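-- pv_equiv track=rewrite | github.com/dallyy/code-by-python | 数学相关模板/数学.py | fps_sub
-- ===== SOURCE A (Python) =====
-- MOD = 998244353  # 常用的NTT模数，满足 MOD = c * 2^k + 1
--
-- def fps_sub(a: list, b: list) -> list:
--     """形式幂级数减法"""
--     if len(a) < len(b):
--         res = b[::]
--         for i, x in enumerate(a):
--             res[i] -= x
--         res = fps_neg(res)
--     else:
--         res = a[::]
--         for i, x in enumerate(b):
--             res[i] -= x
--     return [x % MOD for x in res]
--
-- def fps_neg(a: list) -> list:
--     """形式幂级数取负"""
--     return [MOD - x if x else 0 for x in a]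
-- ===== SOURCE B (Python) =====
-- MOD = 998244353
--
--
-- def fps_sub(a: list, b: list) -> list:
--     """形式幂级数减法: symmetric one-pass, pad the shorter with 0."""
--     n = max(len(a), len(b))
--     return [((a[i] if i < len(a) else 0) - (b[i] if i < len(b) else 0)) % MOD
--             for i in range(n)]
-- ===== Notes on version B (the rewrite author's own statement) =====
-- stated objective: simpler
-- what changed: B pads the shorter list with zeros and computes (a[i]-b[i]) % MOD in one symmetric pass, eliminating A's length branch, the list copy with in-place subtraction, and the fps_neg double-negation path.
import Mathlib
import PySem

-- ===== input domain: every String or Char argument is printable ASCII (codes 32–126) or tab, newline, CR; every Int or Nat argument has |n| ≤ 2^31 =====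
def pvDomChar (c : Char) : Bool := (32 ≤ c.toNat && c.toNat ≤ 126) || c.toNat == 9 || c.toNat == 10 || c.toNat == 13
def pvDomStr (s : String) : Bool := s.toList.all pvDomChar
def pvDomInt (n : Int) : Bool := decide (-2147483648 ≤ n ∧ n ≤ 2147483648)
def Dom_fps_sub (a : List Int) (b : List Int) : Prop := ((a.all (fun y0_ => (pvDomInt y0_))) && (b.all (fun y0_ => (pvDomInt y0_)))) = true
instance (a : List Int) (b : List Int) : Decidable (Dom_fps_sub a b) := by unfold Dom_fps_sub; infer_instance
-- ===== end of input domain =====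

-- B replaces A's length branch, list copy with in-place subtraction and fps_neg
-- double-negation path by one symmetric pass (a[i]-b[i]) % MOD over zero-padded lists.

-- ===== PORT A =====
def pvMOD : Int := 998244353

-- the loop 'for i, x in enumerate(xs): res[i] -= x' on a copy res of r,
-- as structural recursion over the same prefix of positions
def pvSubPrefix : List Int → List Int → List Int
  | [], r => r
  | _ :: _, [] => []
  | x :: xs, r0 :: rs => (r0 - x) :: pvSubPrefix xs rs

def pvFpsNeg (a : List Int) : List Int := a.map (fun x => if x ≠ 0 then pvMOD - x else 0)

def fps_sub (a : List Int) (b : List Int) : List Int :=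
  let res := if a.length < b.length then pvFpsNeg (pvSubPrefix a b) else pvSubPrefix b a
  res.map (fun x => PySem.Int.mod x pvMOD)

-- ===== PORT B =====
def fps_sub_alt (a : List Int) (b : List Int) : List Int :=
  (List.range (max a.length b.length)).map
    (fun i => PySem.Int.mod (a.getD i 0 - b.getD i 0) pvMOD)

-- ===== PRECONDITION & SPEC =====
def Spec_fps_sub (a : List Int) (b : List Int) (out : List Int) : Prop := out = fps_sub_alt a b
instance (a : List Int) (b : List Int) (out : List Int) : Decidable (Spec_fps_sub a b out) := by unfold Spec_fps_sub; infer_instance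

-- ===== CLAIM (what is proved, stated in full; the proofs are below) =====
def Claim_equal_fps_sub : Prop := ∀ (a : List Int) (b : List Int), Dom_fps_sub a b → Spec_fps_sub a b (fps_sub a b)

-- ===== LEMMAS AND PROOFS =====

theorem pvSubPrefix_getElem? (xs : List Int) (r : List Int) (i : Nat)
    (h : xs.length ≤ r.length) :
    (pvSubPrefix xs r)[i]? = r[i]?.map (fun y => y - xs.getD i 0) := by
  induction xs generalizing r i with
  | nil =>
      simp [pvSubPrefix]
  | cons x xs ih =>
      cases r with
      | nil => simp at h
      | cons r0 rs =>
          cases i with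
          | zero => simp [pvSubPrefix]
          | succ j =>
              simp only [pvSubPrefix, List.getElem?_cons_succ, List.getD]
              exact ih rs j (by simpa using h)

theorem pvModNeg (s : Int) :
    PySem.Int.mod (if s ≠ 0 then pvMOD - s else 0) pvMOD = PySem.Int.mod (-s) pvMOD := by
  rw [PySem.Int.mod_eq_emod_of_pos (by norm_num [pvMOD]),
      PySem.Int.mod_eq_emod_of_pos (by norm_num [pvMOD])]
  split_ifs with h
  · unfold pvMOD; omega
  · simp only [not_not] at h
    subst h
    simp

-- ===== VERDICT (by name: the statement is the Claim_ definition above) =====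
theorem fps_sub_spec : Claim_equal_fps_sub := by
  intro a b _
  unfold Spec_fps_sub fps_sub fps_sub_alt
  apply List.ext_getElem?
  intro i
  by_cases hlen : a.length < b.length
  · have hmax : max a.length b.length = b.length := Nat.max_eq_right (le_of_lt hlen)
    simp only [if_pos hlen, hmax, pvFpsNeg, List.map_map, List.getElem?_map,
      pvSubPrefix_getElem? a b i (le_of_lt hlen)]
    by_cases hi : i < b.length
    · rw [List.getElem?_range hi, List.getElem?_eq_getElem hi]
      simp only [Option.map_some, Function.comp_apply]
      rw [pvModNeg (b[i] - a.getD i 0)]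
      have hb : b.getD i 0 = b[i] := List.getD_eq_getElem b 0 hi
      have harg : -(b[i] - a.getD i 0) = a.getD i 0 - b.getD i 0 := by omega
      rw [harg]
    · rw [List.getElem?_eq_none (by omega), List.getElem?_eq_none (by simpa using hi)]
      simp
  · have hmax : max a.length b.length = a.length := Nat.max_eq_left (by omega)
    simp only [if_neg hlen, hmax, List.getElem?_map,
      pvSubPrefix_getElem? b a i (by omega)]
    by_cases hi : i < a.length
    · rw [List.getElem?_range hi, List.getElem?_eq_getElem hi]
      simp only [Option.map_some]
      have ha : a.getD i 0 = a[i] := List.getD_eq_getElem a 0 hi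
      have harg : a[i] - b.getD i 0 = a.getD i 0 - b.getD i 0 := by omega
      rw [harg]
    · rw [List.getElem?_eq_none (by omega), List.getElem?_eq_none (by simpa using hi)]
      simp
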